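-- pv_equiv track=rewrite | github.com/yamaguchigo1923/uruno_ocr_backend | test/di_llm/run_di_llm.py | _count_nonempty_columns
-- ===== SOURCE A (Python) =====
-- from typing import Any, Dict, List, Tuple
--
-- def _count_nonempty_columns(table: List[List[str]]) -> int:
--     if not table:
--         return 0
--     max_cols = max((len(r) for r in table), default=0)
--     nonempty = 0
--     for c in range(max_cols):
--         has_val = False
--         for r in table:
--             if c < len(r) and str(r[c]).strip():
--                 has_val = True
--                 break
--         if has_val:
--             nonempty += 1
--     return nonempty
-- ===== SOURCE B (Python) =====
-- def _count_nonempty_columns(table):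
--     seen = set()
--     for row in table:
--         for c, v in enumerate(row):
--             if str(v).strip():
--                 seen.add(c)
--     return len(seen)
-- ===== Notes on version B (the rewrite author's own statement) =====
-- stated objective: simpler
-- what changed: Replaces the column-major double loop (max-width computation plus per-column scan over all rows with early break) by a single row-major pass that collects the indices of non-empty cells in a set and returns its size.
import Mathlib
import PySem

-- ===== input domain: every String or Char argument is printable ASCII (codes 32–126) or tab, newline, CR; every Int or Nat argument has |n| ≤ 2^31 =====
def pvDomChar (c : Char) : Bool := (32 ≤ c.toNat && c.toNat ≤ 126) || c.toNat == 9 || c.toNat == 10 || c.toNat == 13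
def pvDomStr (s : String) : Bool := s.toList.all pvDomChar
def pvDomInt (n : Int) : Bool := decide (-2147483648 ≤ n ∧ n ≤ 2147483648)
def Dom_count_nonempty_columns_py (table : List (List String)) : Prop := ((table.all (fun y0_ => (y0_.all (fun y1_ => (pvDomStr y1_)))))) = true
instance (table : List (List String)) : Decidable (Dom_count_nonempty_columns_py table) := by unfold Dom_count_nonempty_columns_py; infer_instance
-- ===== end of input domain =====

-- B replaces A's column-major scan (max width, then per-column row scan with break)
-- by one row-major pass collecting non-empty cell column indices in a set (objective: simpler).

-- ===== PORT A =====
-- inner 'for r in table: … break' loop: stops at the first row with a value in column c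
def pvAHasVal (c : Int) : List (List String) → Bool
  | [] => false
  | r :: rs =>
    if c < PySem.List.len r ∧ PySem.Str.strip (PySem.List.pyGetD r c "") ≠ "" then true
    else pvAHasVal c rs

def count_nonempty_columns_py (table : List (List String)) : Int :=
  if table = [] then 0
  else
    let max_cols := (PySem.List.max? (table.map (fun r => PySem.List.len r)) (fun x => x)).getD 0
    (PySem.List.pyRange 0 max_cols 1).foldl
      (fun nonempty c => if pvAHasVal c table then nonempty + 1 else nonempty) 0

-- ===== PORT B =====
def count_nonempty_columns_py_alt (table : List (List String)) : Int :=
  let seen : PySem.Set Int :=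
    table.foldl (fun seen row =>
      (PySem.List.enumerate row 0).foldl
        (fun seen cv => if PySem.Str.strip cv.2 ≠ "" then PySem.Set.add seen cv.1 else seen)
        seen) PySem.Set.empty
  PySem.Set.len seen

-- ===== PRECONDITION & SPEC =====
def Spec_count_nonempty_columns_py (table : List (List String)) (out : Int) : Prop := out = count_nonempty_columns_py_alt table
instance (table : List (List String)) (out : Int) : Decidable (Spec_count_nonempty_columns_py table out) := by unfold Spec_count_nonempty_columns_py; infer_instance

-- ===== CLAIM (what is proved, stated in full; the proofs are below) =====
def Claim_equal_count_nonempty_columns_py : Prop := ∀ (table : List (List String)), Dom_count_nonempty_columns_py table → Spec_count_nonempty_columns_py table (count_nonempty_columns_py table)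

-- ===== LEMMAS AND PROOFS =====

-- the predicate both programs decide for a column index c
def pvHit (table : List (List String)) (c : Int) : Bool :=
  table.any (fun r => decide (c < PySem.List.len r) && decide (PySem.Str.strip (PySem.List.pyGetD r c "") ≠ ""))

theorem pvAHasVal_eq_hit (c : Int) (table : List (List String)) :
    pvAHasVal c table = pvHit table c := by
  induction table with
  | nil => rfl
  | cons r rs ih =>
    by_cases h1 : c < PySem.List.len r <;>
      by_cases h2 : PySem.Str.strip (PySem.List.pyGetD r c "") ≠ "" <;>
        simp [pvAHasVal, pvHit, h2, ih] <;> rfl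

theorem pvCount_foldl (table : List (List String)) (l : List Int) (n0 : Int) :
    l.foldl (fun nonempty c => if pvAHasVal c table then nonempty + 1 else nonempty) n0
      = n0 + (l.filter (fun c => pvHit table c)).length := by
  induction l generalizing n0 with
  | nil => simp
  | cons c cs ih =>
    simp only [pvAHasVal_eq_hit] at ih ⊢
    simp only [List.foldl_cons, List.filter_cons]
    split_ifs with h
    · rw [ih, List.length_cons]; push_cast; ring
    · rw [ih]

-- the inner foldl over one row's enumerate, over an arbitrary list of pairs
theorem pvInner_mem (l : List (Int × String)) (s : PySem.Set Int) (y : Int) :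
    (y ∈ l.foldl (fun s cv => if PySem.Str.strip cv.2 ≠ "" then PySem.Set.add s cv.1 else s) s)
      ↔ y ∈ s ∨ ∃ cv ∈ l, PySem.Str.strip cv.2 ≠ "" ∧ y = cv.1 := by
  induction l generalizing s with
  | nil => simp
  | cons cv rest ih =>
    simp only [List.foldl_cons]
    by_cases h : PySem.Str.strip cv.2 ≠ ""
    · rw [if_pos h, ih]
      simp only [PySem.Set.mem_add, List.mem_cons]
      constructor
      · rintro ((hy | rfl) | ⟨d, hd, hq, rfl⟩)
        · exact Or.inl hy
        · exact Or.inr ⟨cv, Or.inl rfl, h, rfl⟩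
        · exact Or.inr ⟨d, Or.inr hd, hq, rfl⟩
      · rintro (hy | ⟨d, (rfl | hd), hq, rfl⟩)
        · exact Or.inl (Or.inl hy)
        · exact Or.inl (Or.inr rfl)
        · exact Or.inr ⟨d, hd, hq, rfl⟩
    · rw [if_neg h, ih]
      simp only [List.mem_cons]
      constructor
      · rintro (hy | ⟨d, hd, hq, rfl⟩)
        · exact Or.inl hy
        · exact Or.inr ⟨d, Or.inr hd, hq, rfl⟩
      · rintro (hy | ⟨d, (rfl | hd), hq, rfl⟩)
        · exact Or.inl hy
        · exact absurd hq h
        · exact Or.inr ⟨d, hd, hq, rfl⟩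

theorem pvInner_nodup (l : List (Int × String)) (s : PySem.Set Int) (hs : s.Nodup) :
    (l.foldl (fun s cv => if PySem.Str.strip cv.2 ≠ "" then PySem.Set.add s cv.1 else s) s).Nodup := by
  induction l generalizing s with
  | nil => exact hs
  | cons cv rest ih =>
    simp only [List.foldl_cons]
    split_ifs with h
    · exact ih _ (PySem.Set.nodup_add _ _ hs)
    · exact ih _ hs

theorem pvSeen_mem (table : List (List String)) (s : PySem.Set Int) (y : Int) :
    (y ∈ table.foldl (fun s row =>
        (PySem.List.enumerate row 0).foldl
          (fun s cv => if PySem.Str.strip cv.2 ≠ "" then PySem.Set.add s cv.1 else s) s) s)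
      ↔ y ∈ s ∨ ∃ r ∈ table, ∃ cv ∈ PySem.List.enumerate r 0, PySem.Str.strip cv.2 ≠ "" ∧ y = cv.1 := by
  induction table generalizing s with
  | nil => simp
  | cons r rs ih =>
    simp only [List.foldl_cons]
    rw [ih]
    simp only [pvInner_mem, List.mem_cons]
    constructor
    · rintro ((h | ⟨cv, hcv, hne, hy⟩) | ⟨r', hr', hrest⟩)
      · exact Or.inl h
      · exact Or.inr ⟨r, Or.inl rfl, cv, hcv, hne, hy⟩
      · exact Or.inr ⟨r', Or.inr hr', hrest⟩
    · rintro (h | ⟨r', (rfl | hr'), hrest⟩)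
      · exact Or.inl (Or.inl h)
      · exact Or.inl (Or.inr hrest)
      · exact Or.inr ⟨r', hr', hrest⟩

theorem pvSeen_nodup (table : List (List String)) (s : PySem.Set Int) (hs : s.Nodup) :
    (table.foldl (fun s row =>
        (PySem.List.enumerate row 0).foldl
          (fun s cv => if PySem.Str.strip cv.2 ≠ "" then PySem.Set.add s cv.1 else s) s) s).Nodup := by
  induction table generalizing s with
  | nil => exact hs
  | cons r rs ih => exact ih _ (pvInner_nodup _ _ hs)

-- the two sides describe the same set of column indices
theorem pvMem_iff (table : List (List String)) (m : Int)
    (hm : PySem.List.max? (table.map (fun r => PySem.List.len r)) (fun x => x) = some m)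
    (y : Int) :
    (∃ r ∈ table, ∃ cv ∈ PySem.List.enumerate r 0, PySem.Str.strip cv.2 ≠ "" ∧ y = cv.1)
      ↔ y ∈ (PySem.List.pyRange 0 m 1).filter (fun c => pvHit table c) := by
  have hle : ∀ r ∈ table, PySem.List.len r ≤ m := by
    intro r hr
    exact PySem.List.max?_isMax hm _ (List.mem_map_of_mem hr)
  constructor
  · rintro ⟨r, hr, cv, hcv, hne, rfl⟩
    rcases (PySem.List.mem_enumerate_iff r 0 cv).mp hcv with ⟨k, hk, rfl⟩
    simp only [zero_add]
    rw [List.mem_filter]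
    refine ⟨?_, ?_⟩
    · rw [PySem.List.mem_pyRange_one]
      have hmr := hle r hr
      simp only [PySem.List.len_eq] at hmr
      exact ⟨by exact_mod_cast Nat.zero_le k, lt_of_lt_of_le (by exact_mod_cast hk) hmr⟩
    · simp only [pvHit, List.any_eq_true]
      refine ⟨r, hr, ?_⟩
      have hget : PySem.List.pyGetD r (k : Int) "" = r[k] := by
        rw [PySem.List.pyGetD_natCast, List.getD_eq_getElem _ _ hk]
      simp only [PySem.List.len_eq, hget]
      simp [hk, hne]
  · intro hy
    rw [List.mem_filter] at hy
    obtain ⟨hyr, hhit⟩ := hy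
    rw [PySem.List.mem_pyRange_one] at hyr
    simp only [pvHit, List.any_eq_true, Bool.and_eq_true, decide_eq_true_eq] at hhit
    obtain ⟨r, hr, hlt, hne⟩ := hhit
    refine ⟨r, hr, (y, PySem.List.pyGetD r y ""), ?_, hne, rfl⟩
    rw [PySem.List.mem_enumerate_iff]
    have h0 : 0 ≤ y := hyr.1
    simp only [PySem.List.len_eq] at hlt
    have hk : y.toNat < r.length := by omega
    refine ⟨y.toNat, hk, ?_⟩
    have hcast : ((y.toNat : Int)) = y := Int.toNat_of_nonneg h0
    have hget : PySem.List.pyGetD r y "" = r[y.toNat] := by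
      rw [PySem.List.pyGetD_of_nonneg _ _ h0, List.getD_eq_getElem _ _ hk]
    rw [hget, hcast, zero_add]

-- ===== VERDICT (by name: the statement is the Claim_ definition above) =====
theorem count_nonempty_columns_py_spec : Claim_equal_count_nonempty_columns_py := by
  intro table _
  unfold Spec_count_nonempty_columns_py count_nonempty_columns_py count_nonempty_columns_py_alt
  by_cases htne : table = []
  · subst htne; simp [PySem.Set.len, PySem.Set.empty]
  · simp only [if_neg htne]
    obtain ⟨m, hm⟩ : ∃ m, PySem.List.max? (table.map (fun r => PySem.List.len r)) (fun x => x) = some m := by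
      rcases h : PySem.List.max? (table.map (fun r => PySem.List.len r)) (fun x => x) with _ | m
      · exact absurd ((PySem.List.max?_eq_none_iff _ _).mp h) (by simpa using htne)
      · exact ⟨m, rfl⟩
    rw [pvCount_foldl, zero_add, hm]
    simp only [Option.getD_some]
    have hnodupS := pvSeen_nodup table PySem.Set.empty (by simp [PySem.Set.empty])
    have hnodupF : ((PySem.List.pyRange 0 m 1).filter (fun c => pvHit table c)).Nodup :=
      (PySem.List.nodup_pyRange_one _ _).filter _
    have hperm : (table.foldl (fun s row =>
        (PySem.List.enumerate row 0).foldl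
          (fun s cv => if PySem.Str.strip cv.2 ≠ "" then PySem.Set.add s cv.1 else s) s)
        PySem.Set.empty).Perm
        ((PySem.List.pyRange 0 m 1).filter (fun c => pvHit table c)) := by
      rw [List.perm_ext_iff_of_nodup hnodupS hnodupF]
      intro y
      rw [pvSeen_mem]
      simp only [PySem.Set.empty, List.not_mem_nil, false_or]
      exact pvMem_iff table m hm y
    have hlen := hperm.length_eq
    simp only [PySem.Set.len]
    exact_mod_cast hlen.symm
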